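-- pv_equiv track=rewrite | github.com/Daehico/fundamentals-of-programming.-introduction-to-python. | FourthLessonHomework/RecursiveHomework/ThirdTask.py | phonetic_alphabet_conversion
-- ===== SOURCE A (Python) =====
-- PHONETIC_ALPHABET = {
--     'A': 'Alpha',
--     'B': 'Bravo',
--     'C': 'Charlie',
--     'D': 'Delta',
--     'E': 'Echo',
--     'F': 'Foxtrot',
--     'G': 'Golf',
--     'H': 'Hotel',
--     'I': 'India',
--     'J': 'Juliet',
--     'K': 'Kilo',
--     'L': 'Lima',
--     'M': 'Mike',
--     'N': 'November',
--     'O': 'Oscar',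
--     'P': 'Papa',
--     'Q': 'Quebec',
--     'R': 'Romeo',
--     'S': 'Sierra',
--     'T': 'Tango',
--     'U': 'Uniform',
--     'V': 'Victor',
--     'W': 'Whiskey',
--     'X': 'Xray',
--     'Y': 'Yankee',
--     'Z': 'Zulu'
-- }
--
-- def phonetic_alphabet_conversion(string):
--     string = string.replace(" ", "").upper()
--
--     if not string:
--         return []
--
--     first_char = string[0]
--     rest_of_string = string[1:]
--
--     if first_char in PHONETIC_ALPHABET:
--         return [PHONETIC_ALPHABET[first_char]] + phonetic_alphabet_conversion(rest_of_string)
--     else: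
--         return [f"'{first_char}' не является буквой англ. алфавита"] + phonetic_alphabet_conversion(rest_of_string)
-- ===== SOURCE B (Python) =====
-- WORDS = ["Alpha", "Bravo", "Charlie", "Delta", "Echo", "Foxtrot", "Golf",
--          "Hotel", "India", "Juliet", "Kilo", "Lima", "Mike", "November",
--          "Oscar", "Papa", "Quebec", "Romeo", "Sierra", "Tango", "Uniform",
--          "Victor", "Whiskey", "Xray", "Yankee", "Zulu"]
--
--
-- def phonetic_alphabet_conversion(string):
--     # single fused pass: skip spaces, uppercase each char, index into a word table
--     out = []
--     for ch in string:
--         if ch == ' ':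
--             continue
--         u = ch.upper()
--         i = ord(u) - 65
--         if 0 <= i < 26:
--             out.append(WORDS[i])
--         else:
--             out.append(f"'{u}' не является буквой англ. алфавита")
--     return out
-- ===== Notes on version B (the rewrite author's own statement) =====
-- stated objective: faster
-- what changed: Replaces A's recursion that re-normalizes and re-slices the whole remaining string on every call (with a dict lookup) by one fused iterative pass that skips spaces, uppercases each character and indexes into a 26-entry word table by character code.
import Mathlib
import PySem

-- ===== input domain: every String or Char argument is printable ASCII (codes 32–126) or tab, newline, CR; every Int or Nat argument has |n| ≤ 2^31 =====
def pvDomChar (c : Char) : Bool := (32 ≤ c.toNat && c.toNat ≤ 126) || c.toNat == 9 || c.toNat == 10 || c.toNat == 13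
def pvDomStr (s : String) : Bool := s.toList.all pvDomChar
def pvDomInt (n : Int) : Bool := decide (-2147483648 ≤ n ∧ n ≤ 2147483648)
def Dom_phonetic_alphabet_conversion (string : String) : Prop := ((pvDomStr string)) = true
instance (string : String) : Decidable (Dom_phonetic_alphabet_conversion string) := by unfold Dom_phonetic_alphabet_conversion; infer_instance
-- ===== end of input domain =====

-- B replaces A's recursion (which re-normalizes the remaining string at every call and
-- looks each letter up in a dict) with one fused iterative pass that skips spaces,
-- uppercases each character and indexes a 26-entry word table by character code (faster).

-- f"'{c}' не является буквой англ. алфавита"  (shared literal of both programs)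
def pvMsg (c : Char) : String :=
  String.ofList ('\'' :: c :: "' не является буквой англ. алфавита".toList)

-- ===== PORT A ===== (recursive; re-normalizes the remaining string at every call)

-- module constant of A: the NATO dict (keys are single letters)
def pvPhonetic : PySem.Dict Char String := PySem.Dict.mk
  [('A', "Alpha"), ('B', "Bravo"), ('C', "Charlie"), ('D', "Delta"), ('E', "Echo"), ('F', "Foxtrot"), ('G', "Golf"), ('H', "Hotel"), ('I', "India"), ('J', "Juliet"), ('K', "Kilo"), ('L', "Lima"), ('M', "Mike"), ('N', "November"), ('O', "Oscar"), ('P', "Papa"), ('Q', "Quebec"), ('R', "Romeo"), ('S', "Sierra"), ('T', "Tango"), ('U', "Uniform"), ('V', "Victor"), ('W', "Whiskey"), ('X', "Xray"), ('Y', "Yankee"), ('Z', "Zulu")]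

-- string.replace(" ", "").upper()
def pvNorm (cs : List Char) : List Char :=
  PySem.Chars.upper (PySem.Chars.replace cs [' '] [])

-- normalization never lengthens the string (needed for A's termination)
theorem pvReplaceGo_len_le (fuel : Nat) (l acc : List Char) (h : l.length ≤ fuel) :
    (PySem.Chars.replace.go [' '] [] fuel l acc).length ≤ acc.length + l.length := by
  induction fuel generalizing l acc with
  | zero =>
    have : l = [] := List.length_eq_zero_iff.mp (Nat.le_zero.mp h)
    simp [this, PySem.Chars.replace.go]
  | succ n ih =>
    match l with
    | [] => simp [PySem.Chars.replace.go]
    | c :: t =>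
      simp only [PySem.Chars.replace.go]
      split
      · have h2 := ih t acc (by simp at h; omega)
        simp only [List.length_nil, List.length_cons, Nat.zero_add, List.drop_succ_cons,
          List.drop_zero, List.reverse_nil, List.nil_append] at *
        omega
      · have h2 := ih t (c :: acc) (by simp at h; omega)
        simp only [List.length_cons] at *
        omega

theorem pvNorm_len_le (cs : List Char) : (pvNorm cs).length ≤ cs.length := by
  have := pvReplaceGo_len_le cs.length cs [] (le_refl _)
  simp only [pvNorm, PySem.Chars.upper, PySem.Chars.replace, List.length_map]
  simpa using this

def pvConvA (cs : List Char) : List String :=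
  match h : pvNorm cs with
  | [] => []
  | first :: rest =>
    match PySem.Dict.get? pvPhonetic first with
    | some w => [w] ++ pvConvA rest
    | none => [pvMsg first] ++ pvConvA rest
termination_by cs.length
decreasing_by all_goals
  · have h1 := pvNorm_len_le cs
    rw [h] at h1; simp at h1; omega

def phonetic_alphabet_conversion (string : String) : List String :=
  pvConvA string.toList

-- ===== PORT B ===== (one fused pass: skip spaces, uppercase, index the word table)

-- module constant of B: the word table, indexed by ord(letter) - 65
def pvWords : List String := ["Alpha", "Bravo", "Charlie", "Delta", "Echo", "Foxtrot", "Golf", "Hotel", "India", "Juliet", "Kilo", "Lima", "Mike", "November", "Oscar", "Papa", "Quebec", "Romeo", "Sierra", "Tango", "Uniform", "Victor", "Whiskey", "Xray", "Yankee", "Zulu"]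

-- the word for one (already uppercased) character
def pvWordB (u : Char) : String :=
  let i : Int := (u.toNat : Int) - 65
  if 0 ≤ i ∧ i < 26 then (PySem.List.pyGet? pvWords i).getD "" else pvMsg u

def phonetic_alphabet_conversion_alt (string : String) : List String :=
  string.toList.foldl
    (fun out ch =>
      if ch = ' ' then out
      else out ++ [pvWordB (PySem.Chars.upperChar ch)]) []

-- ===== PRECONDITION & SPEC =====
def Spec_phonetic_alphabet_conversion (string : String) (out : List String) : Prop := out = phonetic_alphabet_conversion_alt string
instance (string : String) (out : List String) : Decidable (Spec_phonetic_alphabet_conversion string out) := by unfold Spec_phonetic_alphabet_conversion; infer_instance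

-- ===== CLAIM (what is proved, stated in full; the proofs are below) =====
def Claim_equal_phonetic_alphabet_conversion : Prop := ∀ (string : String), Dom_phonetic_alphabet_conversion string → Spec_phonetic_alphabet_conversion string (phonetic_alphabet_conversion string)

-- ===== LEMMAS AND PROOFS =====

-- A's per-character word (dict lookup with the fallback message)
def pvWordA (c : Char) : String :=
  match PySem.Dict.get? pvPhonetic c with
  | some w => w
  | none => pvMsg c

-- replace.go with old=" ", new="" is filter-out-spaces
theorem pvReplaceGo_filter (fuel : Nat) (l acc : List Char) (h : l.length ≤ fuel) :
    PySem.Chars.replace.go [' '] [] fuel l acc = acc.reverse ++ l.filter (· ≠ ' ') := by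
  induction fuel generalizing l acc with
  | zero =>
    have : l = [] := List.length_eq_zero_iff.mp (Nat.le_zero.mp h)
    simp [this, PySem.Chars.replace.go]
  | succ n ih =>
    match l with
    | [] => simp [PySem.Chars.replace.go]
    | c :: t =>
      simp only [PySem.Chars.replace.go]
      by_cases hc : c = ' '
      · subst hc
        simp [List.isPrefixOf, ih t acc (by simp at h; omega)]
      · have hp : [' '].isPrefixOf (c :: t) = false := by
          simp [List.isPrefixOf]; exact fun hcon => hc hcon.symm
        simp [hp, ih t (c :: acc) (by simp at h; omega), hc]

theorem pvNorm_eq (cs : List Char) :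
    pvNorm cs = (cs.filter (· ≠ ' ')).map PySem.Chars.upperChar := by
  simp [pvNorm, PySem.Chars.upper, PySem.Chars.replace,
    pvReplaceGo_filter cs.length cs [] (le_refl _)]

-- basic Char facts used below
theorem pvChar_le_iff (c : Char) : ('a' ≤ c ∧ c ≤ 'z') ↔ (97 ≤ c.toNat ∧ c.toNat ≤ 122) := by
  rw [Char.le_def, Char.le_def]
  constructor
  · intro ⟨h1, h2⟩
    exact ⟨UInt32.le_iff_toNat_le.mp h1, UInt32.le_iff_toNat_le.mp h2⟩
  · intro ⟨h1, h2⟩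
    exact ⟨UInt32.le_iff_toNat_le.mpr h1, UInt32.le_iff_toNat_le.mpr h2⟩

theorem pvChar_ofNat_toNat (n : Nat) (h : n.isValidChar) : (Char.ofNat n).toNat = n := by
  simp [Char.ofNat, h, Char.toNat, Char.ofNatAux]

theorem pvChar_eq_of_toNat (c d : Char) (h : c.toNat = d.toNat) : c = d :=
  Char.ext (UInt32.toNat_inj.mp h)

-- what upperChar does, on code points
theorem pvUpper_toNat (c : Char) : (PySem.Chars.upperChar c).toNat =
    if 97 ≤ c.toNat ∧ c.toNat ≤ 122 then c.toNat - 32 else c.toNat := by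
  unfold PySem.Chars.upperChar PySem.Chars.islower
  by_cases h : 'a' ≤ c ∧ c ≤ 'z'
  · have hn := (pvChar_le_iff c).mp h
    rw [if_pos (by simp [h.1, h.2]), if_pos hn, pvChar_ofNat_toNat _ (by left; omega)]
  · have hb : ¬(decide ('a' ≤ c) && decide (c ≤ 'z')) = true := by
      simp only [Bool.and_eq_true, decide_eq_true_eq]; exact h
    rw [if_neg hb, if_neg ((pvChar_le_iff c).not.mp h)]

theorem pvUpper_of_not_lower {c : Char} (h : ¬ (97 ≤ c.toNat ∧ c.toNat ≤ 122)) :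
    PySem.Chars.upperChar c = c := by
  have hb : ¬(decide ('a' ≤ c) && decide (c ≤ 'z')) = true := by
    simp only [Bool.and_eq_true, decide_eq_true_eq]; exact (pvChar_le_iff c).not.mpr h
  unfold PySem.Chars.upperChar PySem.Chars.islower
  rw [if_neg hb]

-- upperChar is idempotent, and maps non-spaces to non-spaces
theorem pvUpper_idem (c : Char) :
    PySem.Chars.upperChar (PySem.Chars.upperChar c) = PySem.Chars.upperChar c := by
  by_cases h : 97 ≤ c.toNat ∧ c.toNat ≤ 122
  · exact pvUpper_of_not_lower (by rw [pvUpper_toNat, if_pos h]; omega)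
  · rw [pvUpper_of_not_lower h]
    exact pvUpper_of_not_lower h

theorem pvUpper_ne_space {c : Char} (h : c ≠ ' ') : PySem.Chars.upperChar c ≠ ' ' := by
  intro hcon
  have h2 := congrArg Char.toNat hcon
  rw [pvUpper_toNat] at h2
  have hsp : (' ' : Char).toNat = 32 := rfl
  by_cases hl : 97 ≤ c.toNat ∧ c.toNat ≤ 122
  · rw [if_pos hl, hsp] at h2; omega
  · rw [if_neg hl, hsp] at h2
    exact h (pvChar_eq_of_toNat c ' ' (by rw [h2]; rfl))

-- every character of a normalized string is a fixed point of normalization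
theorem pvNorm_mem_fix {cs : List Char} {c : Char} (h : c ∈ pvNorm cs) :
    PySem.Chars.upperChar c = c ∧ c ≠ ' ' := by
  rw [pvNorm_eq] at h
  obtain ⟨d, hd, rfl⟩ := List.mem_map.mp h
  have hd' : d ≠ ' ' := by simpa using (List.mem_filter.mp hd).2
  exact ⟨pvUpper_idem d, pvUpper_ne_space hd'⟩

-- a list of fixed points normalizes to itself
theorem pvNorm_fixed {cs : List Char}
    (h : ∀ c ∈ cs, PySem.Chars.upperChar c = c ∧ c ≠ ' ') : pvNorm cs = cs := by
  rw [pvNorm_eq]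
  rw [List.filter_eq_self.mpr (fun c hc => by simpa using (h c hc).2)]
  conv_rhs => rw [← List.map_id cs]
  exact List.map_congr_left (fun c hc => (h c hc).1)

-- A's recursion on a list of fixed points is the map of pvWordA
theorem pvConvA_fixed (cs : List Char)
    (h : ∀ c ∈ cs, PySem.Chars.upperChar c = c ∧ c ≠ ' ') :
    pvConvA cs = cs.map pvWordA := by
  induction cs with
  | nil => rw [pvConvA]; rfl
  | cons c t ih =>
    rw [pvConvA]
    have hfix : pvNorm (c :: t) = c :: t := pvNorm_fixed h
    have ht := ih (fun d hd => h d (List.mem_cons_of_mem _ hd))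
    split
    · rename_i heq; rw [hfix] at heq; cases heq
    · rename_i first rest heq
      rw [hfix] at heq
      injection heq with h1 h2
      subst h1; subst h2
      unfold pvWordA
      cases hw : PySem.Dict.get? pvPhonetic c <;> simp [hw, ht, pvWordA]

-- A computes the map of pvWordA over the normalized string
theorem pvConvA_eq (cs : List Char) : pvConvA cs = (pvNorm cs).map pvWordA := by
  rw [pvConvA]
  split
  · rename_i heq; rw [heq]; rfl
  · rename_i first rest heq
    have hrest : ∀ c ∈ rest, PySem.Chars.upperChar c = c ∧ c ≠ ' ' :=
      fun c hc => pvNorm_mem_fix (cs := cs) (by rw [heq]; exact List.mem_cons_of_mem _ hc)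
    have h1 : pvConvA rest = rest.map pvWordA := pvConvA_fixed rest hrest
    rw [heq]
    unfold pvWordA
    cases hw : PySem.Dict.get? pvPhonetic first <;> simp [hw, h1, pvWordA]

-- the dict lookup with fallback and the table indexing agree on every character
theorem pvWord_eq (u : Char) : pvWordA u = pvWordB u := by
  by_cases h : 65 ≤ u.toNat ∧ u.toNat ≤ 90
  · obtain ⟨h1, h2⟩ := h
    have hu : Char.ofNat u.toNat = u :=
      pvChar_eq_of_toNat _ _ (pvChar_ofNat_toNat _ (by left; omega))
    rw [← hu]
    generalize u.toNat = n at h1 h2 ⊢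
    interval_cases n <;> decide
  · have hne : ∀ k : Char, 65 ≤ k.toNat → k.toNat ≤ 90 → (k == u) = false := by
      intro k hk1 hk2
      simp only [beq_eq_false_iff_ne, ne_eq]
      rintro rfl
      exact h ⟨hk1, hk2⟩
    have hnone : PySem.Dict.get? pvPhonetic u = none := by
      simp [pvPhonetic, PySem.Dict.get?,
        hne 'A' (by decide) (by decide), hne 'B' (by decide) (by decide), hne 'C' (by decide) (by decide), hne 'D' (by decide) (by decide), hne 'E' (by decide) (by decide), hne 'F' (by decide) (by decide), hne 'G' (by decide) (by decide), hne 'H' (by decide) (by decide), hne 'I' (by decide) (by decide), hne 'J' (by decide) (by decide), hne 'K' (by decide) (by decide), hne 'L' (by decide) (by decide), hne 'M' (by decide) (by decide), hne 'N' (by decide) (by decide), hne 'O' (by decide) (by decide), hne 'P' (by decide) (by decide), hne 'Q' (by decide) (by decide), hne 'R' (by decide) (by decide), hne 'S' (by decide) (by decide), hne 'T' (by decide) (by decide), hne 'U' (by decide) (by decide), hne 'V' (by decide) (by decide), hne 'W' (by decide) (by decide), hne 'X' (by decide) (by decide), hne 'Y' (by decide) (by decide), hne 'Z' (by decide) (by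 decide)]
    have hidx : ¬ (0 ≤ (u.toNat : Int) - 65 ∧ (u.toNat : Int) - 65 < 26) := by omega
    simp only [pvWordA, hnone, pvWordB]
    rw [if_neg hidx]

-- B's fold appends exactly one word per non-space character
theorem pvFoldB (cs : List Char) (acc : List String) :
    cs.foldl (fun out ch => if ch = ' ' then out
        else out ++ [pvWordB (PySem.Chars.upperChar ch)]) acc
    = acc ++ (cs.filter (· ≠ ' ')).map (fun c => pvWordB (PySem.Chars.upperChar c)) := by
  induction cs generalizing acc with
  | nil => simp
  | cons c t ih =>
    by_cases hc : c = ' '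
    · subst hc; simp [ih]
    · simp [List.foldl_cons, hc, ih]

-- ===== VERDICT (by name: the statement is the Claim_ definition above) =====
theorem phonetic_alphabet_conversion_spec : Claim_equal_phonetic_alphabet_conversion := by
  intro string _
  unfold Spec_phonetic_alphabet_conversion phonetic_alphabet_conversion phonetic_alphabet_conversion_alt
  rw [pvFoldB, pvConvA_eq, pvNorm_eq, List.map_map, List.nil_append]
  exact List.map_congr_left fun c _ => pvWord_eq (PySem.Chars.upperChar c)
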